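-- pv_equiv track=rewrite | github.com/nancyalaa/LeetCode | 2500-delete-greatest-value-in-each-row/2500-delete-greatest-value-in-each-row.py | deleteGreatestValue
-- ===== SOURCE A (Python) =====
-- from typing import List
--
-- def deleteGreatestValue(grid: List[List[int]]) -> int:
--     output = 0
--     while(grid[0]):
--         temp = []
--         for row in range(len(grid)):
--             temp.append(grid[row].pop(grid[row].index(max(grid[row]))))
--         output += max(temp)
--     return output
-- ===== SOURCE B (Python) =====
-- def deleteGreatestValue(grid):
--     srows = [sorted(row, reverse=True) for row in grid]
--     return sum(max(row[i] for row in srows) for i in range(len(srows[0])))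
-- ===== Notes on version B (the rewrite author's own statement) =====
-- stated objective: faster
-- what changed: Replaced the destructive round loop (each round: find, index and pop the max of every row, O(cols) scans per pop, cols rounds) by sorting each row descending once and summing the column-wise maxima of the sorted rows.
import Mathlib
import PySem

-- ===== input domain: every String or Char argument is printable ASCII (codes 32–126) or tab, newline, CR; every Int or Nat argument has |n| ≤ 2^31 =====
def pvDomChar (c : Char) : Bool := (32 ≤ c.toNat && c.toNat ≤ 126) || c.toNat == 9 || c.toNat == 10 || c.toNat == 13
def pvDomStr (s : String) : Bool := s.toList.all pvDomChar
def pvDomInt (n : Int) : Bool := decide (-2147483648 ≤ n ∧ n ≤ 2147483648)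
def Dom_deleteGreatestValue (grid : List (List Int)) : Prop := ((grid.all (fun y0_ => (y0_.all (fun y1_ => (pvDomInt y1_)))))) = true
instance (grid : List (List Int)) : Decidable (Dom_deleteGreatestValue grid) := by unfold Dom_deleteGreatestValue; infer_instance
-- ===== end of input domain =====

-- B replaces A's destructive pop-the-max rounds by one descending sort per row and a sum of
-- column-wise maxima; note A mutates its argument (pops every element of each row) while B does
-- not — the equivalence proved here is about the return value only.

-- ===== PORT A =====
-- one body of A's while-loop, for one row: grid[row].pop(grid[row].index(max(grid[row])))
-- (each 'none' branch is a point where Python raises; unreachable under Pre_)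
def pvStepRow (row : List Int) : Int × List Int :=
  match PySem.List.max? row (fun x => x) with
  | none => (0, row)
  | some m =>
    match PySem.List.index? row m with
    | none => (0, row)
    | some i =>
      match PySem.List.pop? row (Int.ofNat i) with
      | none => (0, row)
      | some (v, rest) => (v, rest)

-- the while-loop; fuel = length of grid[0], which drops by one per round wherever A returns
def pvLoopA : Nat → List (List Int) → Int → Int
  | 0, _, output => output
  | fuel+1, grid, output =>
    if (grid.headD []).isEmpty then output
    else
      let stepped := grid.map pvStepRow
      let temp := stepped.map (·.1)
      pvLoopA fuel (stepped.map (·.2)) (output + (PySem.List.max? temp (fun x => x)).getD 0)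

def deleteGreatestValue (grid : List (List Int)) : Int :=
  pvLoopA (grid.headD []).length grid 0

-- ===== PORT B =====
-- srows = [sorted(row, reverse=True) for row in grid]
-- return sum(max(row[i] for row in srows) for i in range(len(srows[0])))
-- (the .getD defaults stand at points where Python raises; unreachable under Pre_)
def deleteGreatestValue_alt (grid : List (List Int)) : Int :=
  let srows := grid.map (fun r => PySem.List.sorted r (fun x => x) true)
  ((List.range (srows.headD []).length).map (fun i =>
    (PySem.List.max? (srows.map (fun s => (PySem.List.pyGet? s (Int.ofNat i)).getD 0))
      (fun x => x)).getD 0)).sum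

-- ===== PRECONDITION & SPEC =====
-- Pre_ excludes exactly the inputs where BOTH programs raise: the empty grid (IndexError on
-- grid[0] / srows[0] in A and B alike) and grids where some row is shorter than the first row
-- (A: ValueError from max([]) mid-loop; B: IndexError on row[i]).
def Pre_deleteGreatestValue (grid : List (List Int)) : Prop :=
  grid ≠ [] ∧ ∀ row ∈ grid, (grid.headD []).length ≤ row.length
instance (grid : List (List Int)) : Decidable (Pre_deleteGreatestValue grid) := by
  unfold Pre_deleteGreatestValue; infer_instance

def pvWitness_deleteGreatestValue : List (List Int) := [[1, 2, 4], [3, 3, 1]]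

def Spec_deleteGreatestValue (grid : List (List Int)) (out : Int) : Prop := out = deleteGreatestValue_alt grid
instance (grid : List (List Int)) (out : Int) : Decidable (Spec_deleteGreatestValue grid out) := by unfold Spec_deleteGreatestValue; infer_instance

-- ===== CLAIM (what is proved, stated in full; the proofs are below) =====
def Claim_equal_deleteGreatestValue : Prop := ∀ (grid : List (List Int)), Dom_deleteGreatestValue grid → Pre_deleteGreatestValue grid → Spec_deleteGreatestValue grid (deleteGreatestValue grid)

-- ===== LEMMAS AND PROOFS =====

-- the invariant relating A's working rows to B's sorted twins: a working row is a permutation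
-- of what remains of its descending-sorted twin
def pvRel (r s : List Int) : Prop := r.Perm s ∧ s.Pairwise (fun a b : Int => b ≤ a)

lemma pvEraseIdxAppend (pre suf : List Int) (m : Int) :
    (pre ++ m :: suf).eraseIdx pre.length = pre ++ suf := by
  induction pre with
  | nil => simp
  | cons a t ih => simp [ih]

-- one round of A on a row whose max exists pops exactly the (first) maximum: row.erase max
lemma pvStepRow_spec (r : List Int) (m : Int)
    (hm : PySem.List.max? r (fun x => x) = some m) :
    pvStepRow r = (m, r.erase m) := by
  have hmem : m ∈ r := PySem.List.max?_mem hm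
  have hidx : (PySem.List.index? r m).isSome := (PySem.List.index?_isSome_iff r m).mpr hmem
  obtain ⟨i, hi⟩ := Option.isSome_iff_exists.mp hidx
  obtain ⟨pre, suf, hr, hlen, hnp⟩ := (PySem.List.index?_eq_some_iff r m i).mp hi
  subst hr hlen
  have hlt : pre.length < (pre ++ m :: suf).length := by simp
  unfold pvStepRow
  simp only [hm, hi, Int.ofNat_eq_natCast]
  rw [PySem.List.pop?_natCast _ _ hlt]
  simp [List.getElem_of_append rfl rfl, pvEraseIdxAppend, List.erase_append_right _ hnp]

-- head/tail view of one round through the sorted twin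
lemma pvStep_sorted (r : List Int) (m : Int) (t : List Int)
    (h : pvRel r (m :: t)) :
    pvStepRow r = (m, (pvStepRow r).2) ∧ pvRel (pvStepRow r).2 t := by
  obtain ⟨hperm, hpair⟩ := h
  have hne : r ≠ [] := by
    intro h0; subst h0; exact absurd hperm.length_eq (by simp)
  have hsome : (PySem.List.max? r (fun x : Int => x)).isSome := by
    rw [Option.isSome_iff_ne_none]; intro h0
    exact hne ((PySem.List.max?_eq_none_iff _ _).mp h0)
  obtain ⟨m', hm'⟩ := Option.isSome_iff_exists.mp hsome
  have hmm : m' = m := by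
    have h1 : m' ∈ r := PySem.List.max?_mem hm'
    have h2 : m' ∈ m :: t := hperm.mem_iff.mp h1
    have h3 : m ∈ r := hperm.mem_iff.mpr (by simp)
    have h4 : m ≤ m' := by simpa using PySem.List.max?_isMax hm' m h3
    rcases List.mem_cons.mp h2 with h5 | h5
    · exact h5
    · exact le_antisymm ((List.pairwise_cons.mp hpair).1 m' h5) h4
  subst hmm
  have hs := pvStepRow_spec r m' hm'
  rw [hs]
  refine ⟨rfl, ?_, ?_⟩
  · simpa using hperm.erase m'
  · exact (List.pairwise_cons.mp hpair).2

-- each round shortens a nonempty row by exactly one element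
lemma pvStep2_length (r : List Int) (hr : r ≠ []) :
    (pvStepRow r).2.length + 1 = r.length := by
  have hsome : (PySem.List.max? r (fun x : Int => x)).isSome := by
    rw [Option.isSome_iff_ne_none]; intro h0
    exact hr ((PySem.List.max?_eq_none_iff _ _).mp h0)
  obtain ⟨m, hm⟩ := Option.isSome_iff_exists.mp hsome
  rw [pvStepRow_spec r m hm]
  have : m ∈ r := PySem.List.max?_mem hm
  rw [List.length_erase_of_mem this]
  have := List.length_pos_iff.mpr hr
  omega

-- one whole round of A: the stepped rows pair with the tails of the sorted twins, and the
-- popped values are exactly the heads of the sorted twins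
lemma pvStepAll : ∀ (rows srows : List (List Int)),
    List.Forall₂ pvRel rows srows → (∀ r ∈ rows, r ≠ []) →
    List.Forall₂ pvRel (rows.map (fun r => (pvStepRow r).2)) (srows.map List.tail) ∧
    rows.map (fun r => (pvStepRow r).1) = srows.map (fun s => s.headD 0) := by
  intro rows srows h
  induction h with
  | nil => simp
  | @cons r s rows' srows' hrs _ ih =>
    intro hne
    have hrne : r ≠ [] := hne r (by simp)
    have hsne : s ≠ [] := by
      intro h0; subst h0; exact absurd hrs.1.length_eq (by simpa using hrne)
    obtain ⟨m, t, rfl⟩ := List.exists_cons_of_ne_nil hsne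
    obtain ⟨h1, h2⟩ := pvStep_sorted r m t hrs
    obtain ⟨ih1, ih2⟩ := ih (fun r hr => hne r (by simp [hr]))
    constructor
    · simp only [List.map_cons, List.tail_cons]
      exact List.Forall₂.cons h2 ih1
    · simp only [List.map_cons, ih2, List.headD_cons]
      rw [h1]

lemma pvCol0 (s : List Int) : (PySem.List.pyGet? s (Int.ofNat 0)).getD 0 = s.headD 0 := by
  cases s with
  | nil => rfl
  | cons a t => simp

lemma pvShift (srows : List (List Int)) (i : Nat) :
    (srows.map List.tail).map (fun s => (PySem.List.pyGet? s (Int.ofNat i)).getD 0)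
    = srows.map (fun s => (PySem.List.pyGet? s (Int.ofNat (i+1))).getD 0) := by
  rw [List.map_map]
  apply List.map_congr_left
  intro s _
  simp only [Function.comp, Int.ofNat_eq_natCast]
  rw [PySem.List.pyGet?_natCast, PySem.List.pyGet?_natCast, List.getElem?_tail]

-- main invariant: A's loop computes B's column-max sum over the sorted twins
lemma pvMain : ∀ (h : Nat) (rows srows : List (List Int)) (out : Int),
    List.Forall₂ pvRel rows srows →
    (∀ r ∈ rows, h ≤ r.length) →
    pvLoopA h rows out = out + ((List.range h).map (fun i =>
      (PySem.List.max? (srows.map (fun s => (PySem.List.pyGet? s (Int.ofNat i)).getD 0))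
        (fun x => x)).getD 0)).sum
  | 0, rows, srows, out, _, _ => by simp [pvLoopA]
  | h+1, rows, srows, out, hf, hlen => by
    cases rows with
    | nil =>
      cases hf
      simp [pvLoopA, PySem.List.max?]
    | cons r0 rest =>
      have hne' : ∀ r ∈ r0 :: rest, r ≠ [] := by
        intro r hr h0
        have := hlen r hr
        rw [h0] at this; simp at this
      obtain ⟨hF2, hmap1⟩ := pvStepAll _ _ hf hne'
      have hguard : ((r0 :: rest).headD []).isEmpty = false := by
        simp; exact hne' r0 (by simp)
      have hlen' : ∀ r' ∈ (r0 :: rest).map (fun r => (pvStepRow r).2), h ≤ r'.length := by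
        intro r' hr'
        obtain ⟨r, hr, rfl⟩ := List.mem_map.mp hr'
        have h1 := pvStep2_length r (hne' r hr)
        have h2 := hlen r hr
        omega
      have ih := pvMain h ((r0 :: rest).map (fun r => (pvStepRow r).2)) (srows.map List.tail)
        (out + (PySem.List.max? ((r0 :: rest).map (fun r => (pvStepRow r).1)) (fun x => x)).getD 0)
        hF2 hlen'
      simp only [pvLoopA, hguard, Bool.false_eq_true, if_false, List.map_map]
      have hcomp2 : (Prod.snd ∘ pvStepRow) = (fun r : List Int => (pvStepRow r).2) := rfl
      have hcomp1 : (Prod.fst ∘ pvStepRow) = (fun r : List Int => (pvStepRow r).1) := rfl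
      rw [hcomp2, hcomp1, ih, hmap1]
      rw [List.range_succ_eq_map, List.map_cons, List.sum_cons, List.map_map]
      have hsucc : ((List.range h).map ((fun i =>
          (PySem.List.max? (srows.map (fun s => (PySem.List.pyGet? s (Int.ofNat i)).getD 0))
            (fun x => x)).getD 0) ∘ Nat.succ))
          = (List.range h).map (fun i =>
          (PySem.List.max? ((srows.map List.tail).map (fun s => (PySem.List.pyGet? s (Int.ofNat i)).getD 0))
            (fun x => x)).getD 0) := by
        apply List.map_congr_left
        intro i _
        simp only [Function.comp, pvShift]
      rw [hsucc]
      have hhead : srows.map (fun s => (PySem.List.pyGet? s (Int.ofNat 0)).getD 0)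
          = srows.map (fun s => s.headD 0) := by
        apply List.map_congr_left; intro s _; exact pvCol0 s
      rw [hhead]
      ring

-- ===== VERDICT (by name: the statement is the Claim_ definition above) =====
theorem deleteGreatestValue_spec : Claim_equal_deleteGreatestValue := by
  intro grid _ hpre
  obtain ⟨hne, hlen⟩ := hpre
  obtain ⟨g0, rest, rfl⟩ := List.exists_cons_of_ne_nil hne
  have hf : List.Forall₂ pvRel (g0 :: rest)
      ((g0 :: rest).map (fun r => PySem.List.sorted r (fun x => x) true)) := by
    rw [List.forall₂_map_right_iff, List.forall₂_same]
    intro r _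
    exact ⟨(PySem.List.sorted_perm ..).symm, by simpa using PySem.List.sorted_pairwise_rev ..⟩
  have hlen' : ∀ r ∈ g0 :: rest, g0.length ≤ r.length := by simpa using hlen
  have hm := pvMain g0.length (g0 :: rest) _ 0 hf hlen'
  show deleteGreatestValue _ = deleteGreatestValue_alt _
  simp only [deleteGreatestValue, deleteGreatestValue_alt]
  rw [show ((List.map (fun r => PySem.List.sorted r (fun x => x) true) (g0 :: rest)).headD [])
      = PySem.List.sorted g0 (fun x => x) true from rfl]
  rw [PySem.List.length_sorted, List.headD_cons, hm, zero_add]
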